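-- pv_equiv track=rewrite | github.com/pozzo-research-group/OT2-ADT | OT2_DOE/Prepare/OT2_Hcell_commands.py | get_Hcell_sample_wells
-- ===== SOURCE A (Python) =====
-- import string
--
-- def get_Hcell_sample_wells(wellplates, number_of_hcells):
--     """
--     Group sample plate wells row-wise for each H-cell chamber.
--
--     This function assigns the correct rows from 96-well plates to each H-cell.
--     Each H-cell chamber (donor or receptor) gets a dedicated row of sample wells.
--     If multiple 96-well plates are present, wells are grouped by plate and row.
--
--     Parameters
--     ----------
--     wellplates : list
--         Flat list of wells from all sample plates (excluding H-cell wells).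
--     number_of_hcells : int
--         Number of H-cell chambers. Used to determine well-to-chamber mapping.
--
--     Returns
--     -------
--     sample_wells : list of list
--         Nested list where each sublist corresponds to one row of a 96-well plate
--         mapped to a specific H-cell chamber.
--         Example:
--             [
--                 ['A1', 'A2', 'A3', ...],  # H1 donor wells
--                 ['B1', 'B2', 'B3', ...],  # H1 receptor wells
--                 ...
--             ]
--
--     Notes
--     -----
--     - For four H-cells (8 chambers total), the mapping allows two sample plates
--     to be used, for up to 24 samples per chamber. In this case:
--       H1 donor → Row A, H1 receptor → Row B, H2 donor → Row C, etc. for both plates.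
--     - Supports setups with multiple 96-well plates (either max 8 H-cells, or <=4 with
--     extended sample collection).
--     """
--
--     # assigning wells in the 96-well sample plate
--     n_plates = len(wellplates)//96
--     row_letter = list(string.ascii_uppercase[:8])
--
--     sample_wells = []
--
--     if number_of_hcells == 4:
--         for letter in row_letter:
--             wells = []
--             for row in wellplates:
--                 if letter in str(row).split(' ')[0]:
--                     wells.append(row)
--             sample_wells.append(wells)
--     else:
--         for i in range(n_plates):
--             for letter in row_letter:
--                 wells = []
--                 for row in wellplates[i * 96 : (i+1) * 96]:
--                     if letter in str(row).split(' ')[0]: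
--                         wells.append(row)
--                 sample_wells.append(wells)
--
--     return sample_wells
-- ===== SOURCE B (Python) =====
-- import string
--
--
-- def _group_by_rows(wells):
--     """One pass over wells: pre-seeded ordered buckets per row letter, then emit."""
--     letters = list(string.ascii_uppercase[:8])
--     buckets = {letter: [] for letter in letters}
--     for well in wells:
--         token = str(well).split(' ')[0]
--         for letter in letters:
--             if letter in token:
--                 buckets[letter].append(well)
--     return [buckets[letter] for letter in letters]
--
--
-- def get_Hcell_sample_wells(wellplates, number_of_hcells):
--     if number_of_hcells == 4:
--         return _group_by_rows(wellplates)
--     out = []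
--     for i in range(len(wellplates) // 96):
--         out.extend(_group_by_rows(wellplates[i * 96 : (i + 1) * 96]))
--     return out
-- ===== Notes on version B (the rewrite author's own statement) =====
-- stated objective: faster
-- what changed: B makes one pass over the wells per plate, grouping them into a pre-seeded ordered dict of per-row-letter buckets that is then emitted in letter order, instead of A's eight separate scans of the well list (one per row letter) per plate; the token split is done once per well instead of once per (letter, well) pair.
import Mathlib
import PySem

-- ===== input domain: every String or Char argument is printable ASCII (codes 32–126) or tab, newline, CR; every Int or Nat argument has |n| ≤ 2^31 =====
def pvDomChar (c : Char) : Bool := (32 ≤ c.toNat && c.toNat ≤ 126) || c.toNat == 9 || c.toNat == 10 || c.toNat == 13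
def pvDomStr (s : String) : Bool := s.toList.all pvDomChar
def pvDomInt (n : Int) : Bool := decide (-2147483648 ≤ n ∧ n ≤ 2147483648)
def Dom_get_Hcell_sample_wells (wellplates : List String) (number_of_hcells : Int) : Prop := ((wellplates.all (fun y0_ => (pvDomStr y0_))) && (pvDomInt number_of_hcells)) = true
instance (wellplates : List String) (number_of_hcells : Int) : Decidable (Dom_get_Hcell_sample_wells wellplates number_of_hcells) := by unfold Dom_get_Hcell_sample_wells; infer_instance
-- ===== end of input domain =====

-- B replaces A's eight scans of each plate (one per row letter) by a single pass that
-- groups wells into pre-seeded per-letter dict buckets, then emits them in letter order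
-- (objective: constant-factor speedup, measured; same O(n) asymptotics).

-- shared: the membership test 'letter in str(row).split(' ')[0]' (identical in A and B)
def pvRowTok (row : String) : String := ((PySem.Str.split? row " ").getD []).headD ""

def pvHit (letter row : String) : Bool := PySem.Str.isIn letter (pvRowTok row)

-- list(string.ascii_uppercase[:8])
def pvLetters : List String := ["A", "B", "C", "D", "E", "F", "G", "H"]

-- ===== PORT A =====
def get_Hcell_sample_wells (wellplates : List String) (number_of_hcells : Int) : List (List String) :=
  let n_plates := PySem.Int.floordiv (wellplates.length : Int) 96
  if number_of_hcells == 4 then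
    pvLetters.foldl (fun sample_wells letter =>
      sample_wells ++ [wellplates.foldl (fun wells row =>
        if pvHit letter row then wells ++ [row] else wells) []]) []
  else
    (PySem.List.pyRange 0 n_plates 1).foldl (fun sample_wells i =>
      pvLetters.foldl (fun sample_wells letter =>
        sample_wells ++ [(PySem.List.slice wellplates (some (i * 96)) (some ((i + 1) * 96))).foldl
          (fun wells row => if pvHit letter row then wells ++ [row] else wells) []]) sample_wells) []

-- ===== PORT B =====
-- _group_by_rows: one pass, dict buckets keyed by row letter
def pvGroupByRows (wells : List String) : List (List String) :=
  let buckets0 : PySem.Dict String (List String) :=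
    pvLetters.foldl (fun d letter => d.insert letter []) PySem.Dict.empty
  let buckets :=
    wells.foldl (fun d well =>
      let token := pvRowTok well
      pvLetters.foldl (fun d letter =>
        if PySem.Str.isIn letter token then d.modify letter [] (· ++ [well]) else d) d) buckets0
  pvLetters.map (fun letter => buckets.getD letter [])

def get_Hcell_sample_wells_alt (wellplates : List String) (number_of_hcells : Int) : List (List String) :=
  if number_of_hcells == 4 then
    pvGroupByRows wellplates
  else
    (PySem.List.pyRange 0 (PySem.Int.floordiv (wellplates.length : Int) 96) 1).foldl
      (fun out i => out ++ pvGroupByRows (PySem.List.slice wellplates (some (i * 96)) (some ((i + 1) * 96)))) []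

-- ===== PRECONDITION & SPEC =====
def Spec_get_Hcell_sample_wells (wellplates : List String) (number_of_hcells : Int) (out : List (List String)) : Prop := out = get_Hcell_sample_wells_alt wellplates number_of_hcells
instance (wellplates : List String) (number_of_hcells : Int) (out : List (List String)) : Decidable (Spec_get_Hcell_sample_wells wellplates number_of_hcells out) := by unfold Spec_get_Hcell_sample_wells; infer_instance

-- ===== CLAIM (what is proved, stated in full; the proofs are below) =====
def Claim_equal_get_Hcell_sample_wells : Prop := ∀ (wellplates : List String) (number_of_hcells : Int), Dom_get_Hcell_sample_wells wellplates number_of_hcells → Spec_get_Hcell_sample_wells wellplates number_of_hcells (get_Hcell_sample_wells wellplates number_of_hcells)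

-- ===== LEMMAS AND PROOFS =====

-- A's inner scan is a filter
theorem pv_scan_eq_filter (xs : List String) (letter : String) :
    xs.foldl (fun wells row => if pvHit letter row then wells ++ [row] else wells) [] =
      xs.filter (pvHit letter) := by
  simpa using PySem.List.foldl_append_if (pvHit letter) id xs []

-- B's inner per-well loop over letters, seen from one letter's bucket
theorem pv_inner_getD (ls : List String) (d : PySem.Dict String (List String))
    (w c : String) (hc : ls.count c ≤ 1) :
    (ls.foldl (fun d letter =>
        if pvHit letter w then d.modify letter [] (· ++ [w]) else d) d).getD c [] =
      if c ∈ ls ∧ pvHit c w then d.getD c [] ++ [w] else d.getD c [] := by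
  induction ls generalizing d with
  | nil => simp
  | cons l ls ih =>
    rw [List.foldl_cons]
    by_cases hl : l = c
    · subst hl
      have h0 : ls.count l = 0 := by simp [List.count_cons_self] at hc; omega
      have hnot : l ∉ ls := List.count_eq_zero.mp h0
      rw [ih _ (by simp [h0]), if_neg (by simp [hnot])]
      by_cases hh : pvHit l w
      · rw [if_pos (show l ∈ l :: ls ∧ pvHit l w = true from ⟨by simp, hh⟩), if_pos hh]
        exact PySem.Dict.getD_modify_self d l [] (· ++ [w])
      · rw [if_neg (show ¬(l ∈ l :: ls ∧ pvHit l w = true) from by simp [hh]), if_neg hh]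
    · have hc' : ls.count c ≤ 1 := by
        simp [List.count_cons] at hc; omega
      rw [ih _ hc']
      have hgd : (if pvHit l w then d.modify l [] (· ++ [w]) else d).getD c [] = d.getD c [] := by
        split_ifs with h
        · exact PySem.Dict.getD_modify_of_ne d [] (· ++ [w]) (fun h => hl h.symm)
        · rfl
      rw [hgd]
      by_cases hm : c ∈ ls ∧ pvHit c w
      · rw [if_pos hm, if_pos (show c ∈ l :: ls ∧ pvHit c w = true from
          ⟨List.mem_cons_of_mem _ hm.1, hm.2⟩)]
      · rw [if_neg hm, if_neg (show ¬(c ∈ l :: ls ∧ pvHit c w = true) from by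
          rintro ⟨hmem, hh⟩
          exact hm ⟨(List.mem_cons.mp hmem).resolve_left (fun h => hl h.symm), hh⟩)]

-- B's one-pass loop fills bucket c with exactly the filter
theorem pv_outer_getD (xs : List String) (d : PySem.Dict String (List String)) (c : String)
    (hc : pvLetters.count c ≤ 1) (hmem : c ∈ pvLetters) :
    (xs.foldl (fun d well =>
        pvLetters.foldl (fun d letter =>
          if pvHit letter well then d.modify letter [] (· ++ [well]) else d) d) d).getD c [] =
      d.getD c [] ++ xs.filter (pvHit c) := by
  induction xs generalizing d with
  | nil => simp
  | cons x xs ih =>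
    rw [List.foldl_cons, ih, pv_inner_getD _ _ _ _ hc]
    by_cases h : pvHit c x
    · rw [if_pos ⟨hmem, h⟩, List.filter_cons_of_pos h]
      simp
    · rw [if_neg (by simp [h]), List.filter_cons_of_neg (by simp [h])]

theorem pv_seed_getD (c : String) :
    (pvLetters.foldl (fun d letter => d.insert letter ([] : List String)) PySem.Dict.empty).getD c [] = [] := by
  have general : ∀ (ls : List String) (d : PySem.Dict String (List String)),
      d.getD c [] = [] → (ls.foldl (fun d letter => d.insert letter []) d).getD c [] = [] := by
    intro ls
    induction ls with
    | nil => intro d h; simpa using h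
    | cons l ls ih =>
      intro d h
      rw [List.foldl_cons]
      apply ih
      rw [PySem.Dict.getD_insert]
      split_ifs <;> simp [h]
  exact general _ _ (by simp)

-- the grouping helper equals the letter-indexed filters
theorem pvGroupByRows_eq (xs : List String) :
    pvGroupByRows xs = pvLetters.map (fun letter => xs.filter (pvHit letter)) := by
  unfold pvGroupByRows
  have hfun : (fun (d : PySem.Dict String (List String)) well =>
      let token := pvRowTok well
      pvLetters.foldl (fun d letter =>
        if PySem.Str.isIn letter token then d.modify letter [] (· ++ [well]) else d) d) =
    (fun (d : PySem.Dict String (List String)) well =>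
      pvLetters.foldl (fun d letter =>
        if pvHit letter well then d.modify letter [] (· ++ [well]) else d) d) := rfl
  rw [hfun]
  apply List.map_congr_left
  intro c hmem
  have hc : pvLetters.count c ≤ 1 := by
    fin_cases hmem <;> decide
  have hmem' : c ∈ pvLetters := hmem
  rw [pv_outer_getD _ _ _ hc hmem', pv_seed_getD]
  simp

-- ===== VERDICT (by name: the statement is the Claim_ definition above) =====
theorem get_Hcell_sample_wells_spec : Claim_equal_get_Hcell_sample_wells := by
  intro wellplates number_of_hcells _
  unfold Spec_get_Hcell_sample_wells get_Hcell_sample_wells get_Hcell_sample_wells_alt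
  by_cases h4 : number_of_hcells == 4
  · simp only [h4, if_true]
    rw [pvGroupByRows_eq]
    rw [PySem.List.foldl_append_singleton_eq_map]
    simp [pv_scan_eq_filter]
  · simp only [h4, if_false, Bool.false_eq_true]
    have hstep :
        (fun (sample_wells : List (List String)) (i : Int) =>
          pvLetters.foldl (fun sample_wells letter =>
            sample_wells ++ [(PySem.List.slice wellplates (some (i * 96)) (some ((i + 1) * 96))).foldl
              (fun wells row => if pvHit letter row then wells ++ [row] else wells) []]) sample_wells) =
        (fun (out : List (List String)) (i : Int) =>
          out ++ pvGroupByRows (PySem.List.slice wellplates (some (i * 96)) (some ((i + 1) * 96)))) := by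
      funext sw i
      rw [PySem.List.foldl_append_singleton_eq_map, pvGroupByRows_eq]
      simp [pv_scan_eq_filter]
    rw [hstep]
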